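-- pv_equiv track=rewrite | github.com/yeohj0710/supplement-recommender-net | logs/250825/run_model.py | choose_results
-- ===== SOURCE A (Python) =====
-- def choose_results(scored, picked, need, mods, k):
--     allow = set()
--     for d in picked:
--         if need.get(d, True):
--             for c in mods.get(d, {}).get("categories", []):
--                 allow.add(c)
--     pri = [t for t in scored if t[1] in allow]
--     rest = [t for t in scored if t[1] not in allow]
--     out = []
--     for t in pri:
--         if len(out) < k:
--             out.append(t)
--     for t in rest:
--         if len(out) < k:
--             out.append(t)
--     return out
-- ===== SOURCE B (Python) =====
-- def choose_results(scored, picked, need, mods, k):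
--     allow = frozenset().union(
--         *(mods.get(d, {}).get("categories", [])
--           for d in picked if need.get(d, True)))
--     out, deferred = [], []
--     r = max(k, 0)
--     for t in scored:
--         if r == 0:
--             break
--         if t[1] in allow:
--             out.append(t)
--             r -= 1
--         else:
--             deferred.append(t)
--     return out + deferred[:r]
-- ===== Notes on version B (the rewrite author's own statement) =====
-- stated objective: alternative
-- what changed: B computes the allowed categories as one frozenset union over a generator instead of A's nested add-loop, and replaces A's pri/rest partition plus two capped append loops by a single capped pass with a remaining-budget counter that takes allowed items immediately, defers the rest, and tops up from the deferred buffer at the end.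
import Mathlib
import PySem

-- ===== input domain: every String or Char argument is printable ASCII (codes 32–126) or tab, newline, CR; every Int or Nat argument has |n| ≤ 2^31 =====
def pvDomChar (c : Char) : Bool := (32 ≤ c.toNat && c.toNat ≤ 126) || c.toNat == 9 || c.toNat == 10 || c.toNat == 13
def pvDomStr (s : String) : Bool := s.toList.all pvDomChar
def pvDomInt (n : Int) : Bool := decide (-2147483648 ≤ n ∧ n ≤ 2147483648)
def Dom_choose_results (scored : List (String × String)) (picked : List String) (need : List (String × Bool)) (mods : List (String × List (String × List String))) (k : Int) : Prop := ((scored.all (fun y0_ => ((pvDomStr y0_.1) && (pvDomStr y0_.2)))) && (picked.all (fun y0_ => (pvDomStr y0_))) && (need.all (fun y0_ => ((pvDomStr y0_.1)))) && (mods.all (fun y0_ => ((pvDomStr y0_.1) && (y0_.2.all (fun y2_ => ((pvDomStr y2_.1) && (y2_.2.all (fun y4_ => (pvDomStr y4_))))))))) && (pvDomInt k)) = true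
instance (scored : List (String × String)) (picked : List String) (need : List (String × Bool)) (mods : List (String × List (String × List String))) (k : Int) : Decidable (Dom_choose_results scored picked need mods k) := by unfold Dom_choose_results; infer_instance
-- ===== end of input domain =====

-- B computes the allowed categories as one frozenset union over a generator and replaces A's
-- pri/rest partition plus two capped append loops by a single capped pass with a remaining-budget
-- counter, deferring disallowed items and topping up from the deferred buffer (objective: alternative).

-- ===== PORT A =====
-- allow-set of A: nested loop over picked, adding each category
def pvAllowA (picked : List String) (need : List (String × Bool)) (mods : List (String × List (String × List String))) : PySem.Set String :=
  picked.foldl (fun s d =>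
    if PySem.Dict.getD ⟨need⟩ d true then
      (PySem.Dict.getD ⟨PySem.Dict.getD ⟨mods⟩ d []⟩ "categories" []).foldl PySem.Set.add s
    else s) PySem.Set.empty

def choose_results (scored : List (String × String)) (picked : List String) (need : List (String × Bool)) (mods : List (String × List (String × List String))) (k : Int) : List (String × String) :=
  let allow := pvAllowA picked need mods
  let pri := scored.filter (fun t => PySem.Set.contains allow t.2)
  let rest := scored.filter (fun t => !PySem.Set.contains allow t.2)
  let out := pri.foldl (fun out t => if (out.length : Int) < k then out ++ [t] else out) []
  let out := rest.foldl (fun out t => if (out.length : Int) < k then out ++ [t] else out) out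
  out

-- ===== PORT B =====
-- B's allow set: frozenset().union(*(mods.get(d, {}).get("categories", []) for d in picked if need.get(d, True)))
-- (the generator is the filter-then-map list; union of iterables folds Set.update from the empty set)
def pvAllowB (picked : List String) (need : List (String × Bool)) (mods : List (String × List (String × List String))) : PySem.Set String :=
  ((picked.filter (fun d => PySem.Dict.getD ⟨need⟩ d true)).map
    (fun d => PySem.Dict.getD ⟨PySem.Dict.getD ⟨mods⟩ d []⟩ "categories" [])).foldl
    PySem.Set.update PySem.Set.empty

-- B's capped loop: budget r (a Nat, since it starts at max(k,0) and only decreases to the break at 0);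
-- cons-ing onto the front of the recursion transcribes out.append; deferred[:r] with r ≥ 0 is take r.
def pvGo (al : String → Bool) : List (String × String) → List (String × String) → Nat → List (String × String)
  | _, _, 0 => []
  | [], deferred, r + 1 => deferred.take (r + 1)
  | t :: ts, deferred, r + 1 =>
      if al t.2 then t :: pvGo al ts deferred r
      else pvGo al ts (deferred ++ [t]) (r + 1)

def choose_results_alt (scored : List (String × String)) (picked : List String) (need : List (String × Bool)) (mods : List (String × List (String × List String))) (k : Int) : List (String × String) :=
  let allow := pvAllowB picked need mods
  pvGo (fun cat => PySem.Set.contains allow cat) scored [] (max k 0).toNat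

-- ===== PRECONDITION & SPEC =====
def Spec_choose_results (scored : List (String × String)) (picked : List String) (need : List (String × Bool)) (mods : List (String × List (String × List String))) (k : Int) (out : List (String × String)) : Prop := out = choose_results_alt scored picked need mods k
instance (scored : List (String × String)) (picked : List String) (need : List (String × Bool)) (mods : List (String × List (String × List String))) (k : Int) (out : List (String × String)) : Decidable (Spec_choose_results scored picked need mods k out) := by unfold Spec_choose_results; infer_instance

-- ===== CLAIM (what is proved, stated in full; the proofs are below) =====
def Claim_equal_choose_results : Prop := ∀ (scored : List (String × String)) (picked : List String) (need : List (String × Bool)) (mods : List (String × List (String × List String))) (k : Int), Dom_choose_results scored picked need mods k → Spec_choose_results scored picked need mods k (choose_results scored picked need mods k)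

-- ===== LEMMAS AND PROOFS =====

-- membership after Set.add
theorem contains_add (s : PySem.Set String) (x c : String) :
    PySem.Set.contains (PySem.Set.add s x) c = (PySem.Set.contains s c || x == c) := by
  simp only [PySem.Set.add, PySem.Set.contains]
  split_ifs with hs
  · cases hxc : x == c
    · simp
    · have hx : x = c := eq_of_beq hxc
      subst hx
      simpa using hs
  · by_cases hx : c = x
    · simp [hx]
    · simp [hx]
      exact fun h => absurd h.symm hx

-- membership after extending a set by a fold of adds
theorem contains_foldl_add (l : List String) (s : PySem.Set String) (c : String) :
    PySem.Set.contains (l.foldl PySem.Set.add s) c = (PySem.Set.contains s c || l.contains c) := by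
  induction l generalizing s with
  | nil => simp
  | cons x xs ih =>
    simp only [List.foldl_cons, ih, contains_add, List.contains_cons]
    rw [Bool.or_assoc]
    by_cases hx : x = c
    · simp [hx]
    · have h1 : (c == x) = false := beq_false_of_ne (fun h => hx h.symm)
      have h2 : (x == c) = false := beq_false_of_ne hx
      rw [h1, h2]

-- A's allow-set membership coincides with B's any()-predicate, starting from any accumulator set
theorem contains_allow_aux (need : List (String × Bool)) (mods : List (String × List (String × List String))) (c : String) :
    ∀ (picked : List String) (s : PySem.Set String),
    PySem.Set.contains (picked.foldl (fun s d =>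
        if PySem.Dict.getD ⟨need⟩ d true then
          (PySem.Dict.getD ⟨PySem.Dict.getD ⟨mods⟩ d []⟩ "categories" []).foldl PySem.Set.add s
        else s) s) c
      = (PySem.Set.contains s c || picked.any (fun d =>
          PySem.Dict.getD ⟨need⟩ d true &&
          (PySem.Dict.getD ⟨PySem.Dict.getD ⟨mods⟩ d []⟩ "categories" []).contains c)) := by
  intro picked
  induction picked with
  | nil => simp
  | cons d ds ih =>
    intro s
    simp only [List.foldl_cons, List.any_cons]
    by_cases h : PySem.Dict.getD ⟨need⟩ d true
    · rw [ih, if_pos h, contains_foldl_add, h]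
      simp [Bool.or_assoc]
    · rw [ih, if_neg h]
      simp [eq_false_of_ne_true h]

-- membership after a fold of Set.update (union of iterables)
theorem contains_foldl_update (L : List (List String)) (s : PySem.Set String) (c : String) :
    PySem.Set.contains (L.foldl PySem.Set.update s) c
      = (PySem.Set.contains s c || L.any (fun l => l.contains c)) := by
  induction L generalizing s with
  | nil => simp
  | cons l ls ih =>
    simp only [List.foldl_cons, List.any_cons, ih]
    rw [show PySem.Set.update s l = l.foldl PySem.Set.add s from rfl, contains_foldl_add,
      Bool.or_assoc]

-- B's frozenset union has the same members as A's allow-set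
theorem contains_allowB (picked : List String) (need : List (String × Bool)) (mods : List (String × List (String × List String))) (c : String) :
    PySem.Set.contains (pvAllowB picked need mods) c = PySem.Set.contains (pvAllowA picked need mods) c := by
  unfold pvAllowB pvAllowA
  rw [contains_foldl_update, contains_allow_aux]
  simp [List.any_filter, List.any_map, Function.comp]

-- A's capped append loop is a take
theorem foldl_cap {α : Type} (k : Int) :
    ∀ (l acc : List α),
    l.foldl (fun out t => if (out.length : Int) < k then out ++ [t] else out) acc
      = acc ++ l.take (k.toNat - acc.length) := by
  intro l
  induction l with
  | nil => intro acc; simp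
  | cons t l ih =>
    intro acc
    simp only [List.foldl_cons]
    by_cases h : (acc.length : Int) < k
    · rw [if_pos h, ih]
      have hk : acc.length < k.toNat := by omega
      have : k.toNat - acc.length = (k.toNat - (acc.length + 1)) + 1 := by omega
      rw [this]
      simp [List.take_succ_cons]
    · rw [if_neg h, ih]
      have h0 : k.toNat - acc.length = 0 := by omega
      rw [h0]
      simp

-- invariant of B's capped pass: it is the take-r of (allowed ++ deferred ++ disallowed)
theorem pvGo_eq (al : String → Bool) :
    ∀ (items deferred : List (String × String)) (r : Nat),
    pvGo al items deferred r
      = (items.filter (fun t => al t.2) ++ deferred ++ items.filter (fun t => !al t.2)).take r := by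
  intro items
  induction items with
  | nil =>
    intro deferred r
    cases r <;> simp [pvGo]
  | cons t ts ih =>
    intro deferred r
    cases r with
    | zero => simp [pvGo]
    | succ r =>
      by_cases h : al t.2
      · simp [pvGo, h, ih, List.take_succ_cons]
      · rw [show pvGo al (t :: ts) deferred (r + 1) = pvGo al ts (deferred ++ [t]) (r + 1) from by
          simp [pvGo, h]]
        rw [ih]
        simp [h, List.append_assoc]

theorem choose_results_eq_alt (scored : List (String × String)) (picked : List String) (need : List (String × Bool)) (mods : List (String × List (String × List String))) (k : Int) :
    choose_results scored picked need mods k = choose_results_alt scored picked need mods k := by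
  unfold choose_results choose_results_alt
  simp only [contains_allowB]
  rw [pvGo_eq, foldl_cap, foldl_cap]
  set al := fun cat => PySem.Set.contains (pvAllowA picked need mods) cat
  set pri := scored.filter (fun t => al t.2)
  set rest := scored.filter (fun t => !al t.2)
  have hmax : (max k 0).toNat = k.toNat := by omega
  rw [hmax, List.append_nil, List.take_append]
  simp only [List.nil_append, List.length_nil, Nat.sub_zero]
  have hlen : k.toNat - (List.take k.toNat pri).length = k.toNat - pri.length := by
    rw [List.length_take]; omega
  rw [hlen]

-- ===== VERDICT (by name: the statement is the Claim_ definition above) =====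
theorem choose_results_spec : Claim_equal_choose_results := by
  intro scored picked need mods k _
  unfold Spec_choose_results
  exact choose_results_eq_alt scored picked need mods k
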